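-- pv_equiv track=rewrite | github.com/GitMonsters/octotetrahedral-agi | arc-puzzle-catalog/re-arc/solves/080f0db1/solver.py | transform
-- ===== SOURCE A (Python) =====
-- from collections import Counter
--
-- def transform(grid):
--     nrows = len(grid)
--     ncols = len(grid[0])
--     third = nrows // 3
--
--     # Find background color (most common)
--     flat = [c for row in grid for c in row]
--     bg = Counter(flat).most_common(1)[0][0]
--
--     # For each column, find the marker row and map to a color
--     # based on which vertical third it falls in
--     col_colors = []
--     for c in range(ncols):
--         marker_row = None
--         for r in range(nrows):
--             if grid[r][c] != bg:
--                 marker_row = r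
--                 break
--         if marker_row < third:
--             col_colors.append(4)   # top third
--         elif marker_row < 2 * third:
--             col_colors.append(3)   # middle third
--         else:
--             col_colors.append(9)   # bottom third
--
--     return [list(col_colors) for _ in range(nrows)]
-- ===== SOURCE B (Python) =====
-- from collections import Counter
--
-- def transform(grid):
--     nrows = len(grid)
--     ncols = len(grid[0])
--     third = nrows // 3
--
--     flat = [c for row in grid for c in row]
--     bg = Counter(flat).most_common(1)[0][0]
--
--     # Single top-to-bottom sweep: resolve every still-pending column at once.
--     marker_row = [None] * ncols
--     pending = list(range(ncols))
--     for r, row in enumerate(grid):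
--         if not pending:
--             break
--         still = []
--         for c in pending:
--             if row[c] != bg:
--                 marker_row[c] = r
--             else:
--                 still.append(c)
--         pending = still
--
--     col_colors = [4 if m < third else 3 if m < 2 * third else 9
--                   for m in marker_row]
--     return [list(col_colors) for _ in range(nrows)]
-- ===== Notes on version B (the rewrite author's own statement) =====
-- stated objective: alternative
-- what changed: A restarts a downward scan for every column (column-major, nested scans over the grid); B makes a single top-to-bottom row sweep that resolves all still-pending columns at once and stops when none remain, then colors the collected marker rows.
import Mathlib
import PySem

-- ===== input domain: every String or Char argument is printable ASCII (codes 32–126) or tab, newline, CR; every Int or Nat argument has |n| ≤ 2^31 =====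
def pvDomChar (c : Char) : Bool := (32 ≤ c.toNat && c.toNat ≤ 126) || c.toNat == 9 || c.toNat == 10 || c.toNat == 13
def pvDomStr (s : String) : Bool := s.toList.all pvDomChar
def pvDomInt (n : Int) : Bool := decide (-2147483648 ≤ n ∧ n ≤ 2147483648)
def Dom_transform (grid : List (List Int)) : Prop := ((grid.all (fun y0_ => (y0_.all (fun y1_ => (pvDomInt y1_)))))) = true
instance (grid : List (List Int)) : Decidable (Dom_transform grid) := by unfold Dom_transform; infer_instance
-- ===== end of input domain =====

-- B replaces A's per-column downward scans by one top-to-bottom row sweep over the still-pending columns (alternative decomposition, same result).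

-- shared helper: Counter(xs).most_common(1)[0][0] — first-inserted key of maximal count
-- (port of the stdlib call both Pythons make; returns 0 for [] where Python raises IndexError, excluded by Pre_)
def pyMostCommon (xs : List Int) : Int :=
  ((PySem.Dict.counter xs).items.foldl
    (fun (best : Option (Int × Int)) p =>
      match best with
      | none => some p
      | some b => if p.2 > b.2 then some p else best) none).elim 0 (·.1)

-- ===== PORT A =====
def transform (grid : List (List Int)) : List (List Int) :=
  let nrows : Int := grid.length
  let ncols : Int := (grid.headD []).length   -- grid[0]; grid = [] raises, excluded by Pre_
  let third : Int := PySem.Int.floordiv nrows 3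
  let bg : Int := pyMostCommon (grid.flatMap id)
  let colColors : List Int :=
    (PySem.List.pyRange 0 ncols 1).map (fun c =>
      let marker : Option Int :=
        (PySem.List.pyRange 0 nrows 1).find? (fun r =>
          PySem.List.pyGetD (PySem.List.pyGetD grid r []) c 0 != bg)
      match marker with
      | some r => if r < third then (4 : Int) else if r < 2 * third then 3 else 9
      | none => 9)   -- Python raises TypeError here (None < int); excluded by Pre_
  (PySem.List.pyRange 0 nrows 1).map (fun _ => colColors)

-- ===== PORT B =====
-- the row sweep of Source B: for each row, resolve the pending columns hit by this row
def pvSweep (bg : Int) : List (List Int) → Int → List (Option Int) → List Int →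
    List (Option Int) × List Int
  | [], _, marker, pending => (marker, pending)
  | row :: rest, r, marker, pending =>
    if pending.isEmpty then (marker, pending)   -- "if not pending: break"
    else
      let step := pending.foldl
        (fun (acc : List (Option Int) × List Int) c =>
          if PySem.List.pyGetD row c 0 != bg then (acc.1.set c.toNat (some r), acc.2)
          else (acc.1, acc.2 ++ [c]))
        (marker, [])
      pvSweep bg rest (r + 1) step.1 step.2

def transform_alt (grid : List (List Int)) : List (List Int) :=
  let nrows : Int := grid.length
  let ncols : Int := (grid.headD []).length
  let third : Int := PySem.Int.floordiv nrows 3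
  let bg : Int := pyMostCommon (grid.flatMap id)
  let marker : List (Option Int) :=
    (pvSweep bg grid 0 (List.replicate ncols.toNat none) (PySem.List.pyRange 0 ncols 1)).1
  let colColors : List Int :=
    marker.map (fun m =>
      match m with
      | some v => if v < third then (4 : Int) else if v < 2 * third then 3 else 9
      | none => 9)   -- Python raises TypeError here; excluded by Pre_
  (PySem.List.pyRange 0 nrows 1).map (fun _ => colColors)

-- ===== PRECONDITION & SPEC =====
-- Pre_ is exactly the set of inputs the Python A returns on: nonempty grid, at least one
-- cell (else Counter/most_common raises IndexError), and every column c < len(grid[0])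
-- reaches a non-background cell through rows that are all long enough (else IndexError on a
-- short row, or TypeError from 'None < third' on an all-background column).
def Pre_transform (grid : List (List Int)) : Prop :=
  grid ≠ [] ∧ grid.flatMap id ≠ [] ∧
  ∀ c < (grid.headD []).length, ∃ r < grid.length,
    (∀ r' ≤ r, c < (grid.getD r' []).length) ∧
    (grid.getD r []).getD c 0 ≠ pyMostCommon (grid.flatMap id)
instance (grid : List (List Int)) : Decidable (Pre_transform grid) := by
  unfold Pre_transform; infer_instance

def pvWitness_transform : List (List Int) := [[1, 2], [3, 1]]

def Spec_transform (grid : List (List Int)) (out : List (List Int)) : Prop := out = transform_alt grid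
instance (grid : List (List Int)) (out : List (List Int)) : Decidable (Spec_transform grid out) := by unfold Spec_transform; infer_instance

-- ===== CLAIM (what is proved, stated in full; the proofs are below) =====
def Claim_equal_transform : Prop := ∀ (grid : List (List Int)), Dom_transform grid → Pre_transform grid → Spec_transform grid (transform grid)

-- ===== LEMMAS AND PROOFS =====

-- common characterisation: the first row index ≥ a (counting through `rows`) whose cell in
-- column c differs from bg
def pvFirstIdx (bg c : Int) : List (List Int) → Int → Option Int
  | [], _ => none
  | row :: rest, r =>
    if PySem.List.pyGetD row c 0 != bg then some r else pvFirstIdx bg c rest (r + 1)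

theorem findA_gen (bg c : Int) (g : List (List Int)) :
    ∀ (tail : List (List Int)) (a : Int),
    (∀ k : Nat, k < tail.length → PySem.List.pyGetD g (a + (k : Int)) [] = tail.getD k []) →
    (PySem.List.pyRange a (a + tail.length) 1).find?
        (fun r => PySem.List.pyGetD (PySem.List.pyGetD g r []) c 0 != bg)
      = pvFirstIdx bg c tail a := by
  intro tail
  induction tail with
  | nil =>
    intro a _
    simp [PySem.List.pyRange_one_eq_nil, pvFirstIdx]
  | cons row rest ih =>
    intro a h
    have hlen : a + (((row :: rest).length : Nat) : Int) = (a + 1) + (rest.length : Int) := by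
      simp; ring
    rw [hlen, PySem.List.pyRange_one_cons (by
      have : (0:Int) ≤ (rest.length : Int) := by positivity
      omega)]
    have h0 : PySem.List.pyGetD g a [] = row := by
      have := h 0 (by simp)
      simpa using this
    simp only [List.find?_cons]
    rw [pvFirstIdx, h0]
    by_cases hp : (PySem.List.pyGetD row c 0 != bg) = true
    · simp [hp]
    · simp only [Bool.not_eq_true] at hp
      simp only [hp]
      exact ih (a + 1) (fun k hk => by
        have := h (k + 1) (by simpa using Nat.succ_lt_succ hk)
        have harith : a + ((k + 1 : Nat) : Int) = a + 1 + (k : Int) := by push_cast; ring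
        rw [harith] at this
        simpa using this)

theorem sweep_snd (bg : Int) (row : List Int) (r : Int) :
    ∀ (pending : List Int) (m : List (Option Int)) (s : List Int),
    (pending.foldl
      (fun (acc : List (Option Int) × List Int) c =>
        if PySem.List.pyGetD row c 0 != bg then (acc.1.set c.toNat (some r), acc.2)
        else (acc.1, acc.2 ++ [c])) (m, s)).2
      = s ++ pending.filter (fun c => !(PySem.List.pyGetD row c 0 != bg)) := by
  intro pending
  induction pending with
  | nil => intro m s; simp
  | cons c t ih =>
    intro m s
    simp only [List.foldl_cons, List.filter_cons]
    by_cases hp : (PySem.List.pyGetD row c 0 != bg) = true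
    · rw [if_pos hp, ih]
      simp [hp]
    · simp only [Bool.not_eq_true] at hp
      rw [if_neg (by simp [hp]), ih]
      simp [hp]

theorem sweep_fst_len (bg : Int) (row : List Int) (r : Int) :
    ∀ (pending : List Int) (m : List (Option Int)) (s : List Int),
    (pending.foldl
      (fun (acc : List (Option Int) × List Int) c =>
        if PySem.List.pyGetD row c 0 != bg then (acc.1.set c.toNat (some r), acc.2)
        else (acc.1, acc.2 ++ [c])) (m, s)).1.length = m.length := by
  intro pending
  induction pending with
  | nil => intro m s; simp
  | cons c t ih =>
    intro m s
    simp only [List.foldl_cons]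
    by_cases hp : (PySem.List.pyGetD row c 0 != bg) = true
    · rw [if_pos hp, ih]; simp
    · rw [if_neg (by simp_all), ih]

theorem sweep_fst (bg : Int) (row : List Int) (r : Int) :
    ∀ (pending : List Int) (m : List (Option Int)) (s : List Int) (j : Nat),
    (∀ c ∈ pending, 0 ≤ c ∧ c.toNat < m.length) →
    (pending.foldl
      (fun (acc : List (Option Int) × List Int) c =>
        if PySem.List.pyGetD row c 0 != bg then (acc.1.set c.toNat (some r), acc.2)
        else (acc.1, acc.2 ++ [c])) (m, s)).1[j]? =
      if (j : Int) ∈ pending ∧ (PySem.List.pyGetD row (j : Int) 0 != bg) = true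
      then some (some r) else m[j]? := by
  intro pending
  induction pending with
  | nil => intro m s j _; simp
  | cons c t ih =>
    intro m s j hall
    obtain ⟨hc0, hclen⟩ := hall c (by simp)
    have hallt : ∀ c' ∈ t, 0 ≤ c' ∧ c'.toNat < m.length := fun c' hc' => hall c' (by simp [hc'])
    simp only [List.foldl_cons]
    by_cases hp : (PySem.List.pyGetD row c 0 != bg) = true
    · rw [if_pos hp,
        ih (m.set c.toNat (some r)) s j (by simpa using hallt)]
      by_cases hj : (j : Int) = c
      · have hjc : c.toNat = j := by omega
        have hpj : (PySem.List.pyGetD row (j : Int) 0 != bg) = true := by rw [hj]; exact hp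
        have hset : (m.set c.toNat (some r))[j]? = some (some r) := by
          rw [hjc]; simp [hjc ▸ hclen]
        have hmem : (j : Int) ∈ c :: t := by simp [hj]
        split_ifs <;> first | rfl | exact hset | simp_all
      · have hne : c.toNat ≠ j := by omega
        have hset : (m.set c.toNat (some r))[j]? = m[j]? := by
          rw [List.getElem?_set_ne hne]
        rw [hset]
        have hmem : (j : Int) ∈ c :: t ↔ (j : Int) ∈ t := by simp [List.mem_cons, hj]
        simp only [hmem]
    · simp only [Bool.not_eq_true] at hp
      rw [if_neg (by simp [hp]), ih m (s ++ [c]) j hallt]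
      by_cases hj : (j : Int) = c
      · have hpj : (PySem.List.pyGetD row (j : Int) 0 != bg) = false := by rw [hj]; simp [hp]
        have hq : (PySem.List.pyGetD row (j : Int) 0) = bg := by simpa using hpj
        simp [hq]
      · have hmem : (j : Int) ∈ c :: t ↔ (j : Int) ∈ t := by simp [List.mem_cons, hj]
        simp only [hmem]

theorem sweep_spec (bg : Int) :
    ∀ (rows : List (List Int)) (r : Int) (marker : List (Option Int)) (pending : List Int)
      (j : Nat),
    (∀ c ∈ pending, 0 ≤ c ∧ c.toNat < marker.length) →
    (∀ c ∈ pending, marker[c.toNat]? = some none) →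
    (pvSweep bg rows r marker pending).1[j]? =
      if (j : Int) ∈ pending then some (pvFirstIdx bg j rows r) else marker[j]? := by
  intro rows
  induction rows with
  | nil =>
    intro r marker pending j hall hnone
    rw [pvSweep]
    split_ifs with h
    · have := hnone _ h
      simpa [pvFirstIdx] using this
    · rfl
  | cons row rest ih =>
    intro r marker pending j hall hnone
    rw [pvSweep]
    by_cases hemp : pending.isEmpty = true
    · have : pending = [] := List.isEmpty_iff.mp hemp
      subst this
      simp
    · rw [if_neg hemp]
      have hlen := sweep_fst_len bg row r pending marker []
      have hsnd := sweep_snd bg row r pending marker []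
      have hfst := fun (k : Nat) hk => sweep_fst bg row r pending marker [] k hk
      set step := pending.foldl
        (fun (acc : List (Option Int) × List Int) c =>
          if PySem.List.pyGetD row c 0 != bg then (acc.1.set c.toNat (some r), acc.2)
          else (acc.1, acc.2 ++ [c])) (marker, []) with hstep
      have hsub : ∀ c ∈ step.2, c ∈ pending ∧ (PySem.List.pyGetD row c 0 != bg) = false := by
        intro c hc
        rw [hsnd] at hc
        simp only [List.nil_append, List.mem_filter,
          Bool.not_eq_eq_eq_not, Bool.not_true] at hc
        exact hc
      have hall' : ∀ c ∈ step.2, 0 ≤ c ∧ c.toNat < step.1.length := by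
        intro c hc
        have := hall c (hsub c hc).1
        omega
      have hnone' : ∀ c ∈ step.2, step.1[c.toNat]? = some none := by
        intro c hc
        obtain ⟨hcp, hcpred⟩ := hsub c hc
        have h0 := (hall c hcp).1
        have : ((c.toNat : Int)) = c := by omega
        rw [hfst c.toNat hall, this, hcpred]
        simp only [Bool.false_eq_true, and_false, if_false]
        exact hnone c hcp
      rw [ih (r + 1) step.1 step.2 j hall' hnone']
      by_cases hjp : (j : Int) ∈ pending
      · rw [pvFirstIdx]
        by_cases hpj : (PySem.List.pyGetD row (j : Int) 0 != bg) = true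
        · have hjs : (j : Int) ∉ step.2 := by
            intro hc
            have := (hsub _ hc).2
            rw [this] at hpj
            exact absurd hpj (by simp)
          rw [if_neg hjs, hfst j hall, if_pos ⟨hjp, hpj⟩, if_pos hjp, if_pos hpj]
        · have hjs : (j : Int) ∈ step.2 := by
            rw [hsnd]
            simp only [List.nil_append, List.mem_filter]
            exact ⟨hjp, by simp_all⟩
          rw [if_pos hjs, if_pos hjp, if_neg hpj]
      · have hjs : (j : Int) ∉ step.2 := fun hc => hjp (hsub _ hc).1
        rw [if_neg hjs, hfst j hall, if_neg (by simp [hjp]), if_neg hjp]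

theorem sweep_len (bg : Int) :
    ∀ (rows : List (List Int)) (r : Int) (marker : List (Option Int)) (pending : List Int),
    (pvSweep bg rows r marker pending).1.length = marker.length := by
  intro rows
  induction rows with
  | nil => intro r marker pending; rw [pvSweep]
  | cons row rest ih =>
    intro r marker pending
    rw [pvSweep]
    split_ifs with h
    · rfl
    · rw [ih, sweep_fst_len]

theorem colColors_eq (grid : List (List Int)) (bg third : Int) :
    (PySem.List.pyRange 0 ((grid.headD []).length : Int) 1).map (fun c =>
      match (PySem.List.pyRange 0 (grid.length : Int) 1).find? (fun r =>
          PySem.List.pyGetD (PySem.List.pyGetD grid r []) c 0 != bg) with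
      | some r => if r < third then (4 : Int) else if r < 2 * third then 3 else 9
      | none => 9)
    = ((pvSweep bg grid 0 (List.replicate ((grid.headD []).length : Int).toNat none)
          (PySem.List.pyRange 0 ((grid.headD []).length : Int) 1)).1).map (fun m =>
      match m with
      | some v => if v < third then (4 : Int) else if v < 2 * third then 3 else 9
      | none => 9) := by
  set N := (grid.headD []).length with hN
  have hNtoNat : ((N : Int)).toNat = N := by omega
  have hall : ∀ c ∈ PySem.List.pyRange 0 (N : Int) 1,
      0 ≤ c ∧ c.toNat < (List.replicate ((N : Int)).toNat (none : Option Int)).length := by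
    intro c hc
    rw [PySem.List.mem_pyRange_one] at hc
    simp only [List.length_replicate]
    omega
  have hnone : ∀ c ∈ PySem.List.pyRange 0 (N : Int) 1,
      (List.replicate ((N : Int)).toNat (none : Option Int))[c.toNat]? = some none := by
    intro c hc
    rw [PySem.List.mem_pyRange_one] at hc
    rw [List.getElem?_replicate]
    simp only [hNtoNat]
    rw [if_pos (by omega)]
  have hmarker := fun (j : Nat) => sweep_spec bg grid 0
      (List.replicate ((N : Int)).toNat none) (PySem.List.pyRange 0 (N : Int) 1) j hall hnone
  have hmlen : ((pvSweep bg grid 0 (List.replicate ((N : Int)).toNat none)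
      (PySem.List.pyRange 0 (N : Int) 1)).1).length = N := by
    rw [sweep_len]; simp [hNtoNat]
  have hfind : ∀ c : Int, (PySem.List.pyRange 0 (grid.length : Int) 1).find? (fun r =>
      PySem.List.pyGetD (PySem.List.pyGetD grid r []) c 0 != bg) = pvFirstIdx bg c grid 0 := by
    intro c
    have := findA_gen bg c grid grid 0 (fun k hk => by simp)
    simpa using this
  apply List.ext_getElem?
  intro j
  by_cases hj : j < N
  · rw [PySem.List.getElem?_map_pyRange_zero _ N j hj]
    rw [List.getElem?_map, hmarker j, if_pos (by rw [PySem.List.mem_pyRange_one]; omega)]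
    rw [hfind]
    rfl
  · rw [List.getElem?_eq_none
      (by simp only [List.length_map, PySem.List.length_pyRange_one]; omega)]
    symm
    apply List.getElem?_eq_none
    rw [List.length_map, hmlen]
    omega

-- ===== VERDICT (by name: the statement is the Claim_ definition above) =====
theorem transform_spec : Claim_equal_transform := by
  intro grid _ _
  unfold Spec_transform
  simp only [transform, transform_alt]
  rw [colColors_eq grid (pyMostCommon (grid.flatMap id))
    (PySem.Int.floordiv (grid.length : Int) 3)]
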